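-- pv_equiv track=rewrite | github.com/luuismrtn/Advent-Of-Code-42-2024 | day22/day22.py | gen_num
-- ===== SOURCE A (Python) =====
-- def gen_num(num, n):
--     num = int(num)
--     n = int(n)
--     result = num
--     for _ in range(n):
--         result = (result * 64) ^ result
--         result %= 16777216
--
--         result = (result // 32) ^ result
--         result %= 16777216
--
--         result = (result * 2048) ^ result
--         result %= 16777216
--
--     return result
-- ===== SOURCE B (Python) =====
-- BITS = 24
-- MOD = 1 << BITS
--
--
-- def _step_matrix():
--     # column j = image of basis vector 2**j under one PRNG round (a GF(2)-linear map)
--     cols = []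
--     for j in range(BITS):
--         x = 1 << j
--         x = ((x << 6) ^ x) & (MOD - 1)
--         x = ((x >> 5) ^ x) & (MOD - 1)
--         x = ((x << 11) ^ x) & (MOD - 1)
--         cols.append(x)
--     return cols
--
--
-- def _apply(m, x):
--     out = 0
--     for j in range(BITS):
--         if (x >> j) & 1 == 1:
--             out ^= m[j]
--     return out
--
--
-- def _compose(a, b):
--     return [_apply(a, c) for c in b]
--
--
-- def gen_num(num, n):
--     num = int(num)
--     n = int(n)
--     if n <= 0:
--         return num
--     m = _step_matrix()
--     x = num % MOD
--     while n:
--         if n & 1: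
--             x = _apply(m, x)
--         m = _compose(m, m)
--         n >>= 1
--     return x
-- ===== Notes on version B (the rewrite author's own statement) =====
-- stated objective: faster
-- what changed: Replaces the n-round PRNG loop by binary exponentiation of the round's 24x24 GF(2) bit matrix (columns as bitmasks), so the cost is O(log n) matrix squarings instead of n rounds.
import Mathlib
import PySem

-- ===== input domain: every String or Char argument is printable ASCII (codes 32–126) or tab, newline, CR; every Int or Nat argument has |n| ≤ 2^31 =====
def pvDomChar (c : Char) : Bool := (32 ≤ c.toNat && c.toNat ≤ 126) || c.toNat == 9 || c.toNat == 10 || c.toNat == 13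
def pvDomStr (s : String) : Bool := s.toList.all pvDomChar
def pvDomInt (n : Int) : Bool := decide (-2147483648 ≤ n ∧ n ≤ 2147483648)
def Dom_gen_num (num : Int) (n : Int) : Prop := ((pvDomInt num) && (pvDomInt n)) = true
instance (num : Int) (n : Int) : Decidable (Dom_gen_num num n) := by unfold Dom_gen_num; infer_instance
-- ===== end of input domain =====

-- B replaces A's n-round loop by binary exponentiation of the round's 24×24 GF(2) bit matrix (objective: faster).

-- ===== PORT A =====
-- the body of A's for-loop (one PRNG round on the running Int state)
def genStep (result : Int) : Int :=
  let r1 := PySem.Int.mod (PySem.Int.bxor (result * 64) result) 16777216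
  let r2 := PySem.Int.mod (PySem.Int.bxor (PySem.Int.floordiv r1 32) r1) 16777216
  PySem.Int.mod (PySem.Int.bxor (r2 * 2048) r2) 16777216

def gen_num (num : Int) (n : Int) : Int :=
  (PySem.List.pyRange 0 n).foldl (fun result _ => genStep result) num

-- ===== PORT B =====
-- the three masked xor-shift assignments of one PRNG round, on a Nat state
def altStage1 (x : Nat) : Nat := ((x <<< 6) ^^^ x) &&& 16777215
def altStage2 (x : Nat) : Nat := ((x >>> 5) ^^^ x) &&& 16777215
def altStage3 (x : Nat) : Nat := ((x <<< 11) ^^^ x) &&& 16777215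
def altRound (x : Nat) : Nat := altStage3 (altStage2 (altStage1 x))

-- _step_matrix: column j = image of basis vector 2^j
def altMatrix : List Nat := (List.range 24).map (fun j => altRound (1 <<< j))

-- _apply
def altApply (m : List Nat) (x : Nat) : Nat :=
  (List.range 24).foldl (fun out j => if (x >>> j) &&& 1 = 1 then out ^^^ m.getD j 0 else out) 0

-- _compose
def altCompose (a b : List Nat) : List Nat := b.map (fun c => altApply a c)

-- the while-loop of Source B's gen_num (square-and-multiply)
def altPow (m : List Nat) (x : Nat) (k : Nat) : Nat :=
  if h : k = 0 then x
  else altPow (altCompose m m) (if k % 2 = 1 then altApply m x else x) (k / 2)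
termination_by k
decreasing_by exact Nat.div_lt_self (Nat.pos_of_ne_zero h) (by norm_num)

def gen_num_alt (num : Int) (n : Int) : Int :=
  if n ≤ 0 then num
  else ((altPow altMatrix (PySem.Int.mod num 16777216).toNat n.toNat : Nat) : Int)

-- ===== PRECONDITION & SPEC =====
def Spec_gen_num (num : Int) (n : Int) (out : Int) : Prop := out = gen_num_alt num n
instance (num : Int) (n : Int) (out : Int) : Decidable (Spec_gen_num num n out) := by unfold Spec_gen_num; infer_instance

-- ===== CLAIM (what is proved, stated in full; the proofs are below) =====
def Claim_equal_gen_num : Prop := ∀ (num : Int) (n : Int), Dom_gen_num num n → Spec_gen_num num n (gen_num num n)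

-- ===== LEMMAS AND PROOFS =====

-- ---- generic Nat bit lemmas ----
theorem pvXorMod (a b : Nat) : (a ^^^ b) % 2^24 = (a % 2^24) ^^^ (b % 2^24) := by
  apply Nat.eq_of_testBit_eq; intro i
  simp only [Nat.testBit_mod_two_pow, Nat.testBit_xor]
  by_cases h : i < 24 <;> simp [h]

theorem pvXorModL (a b : Nat) : (a ^^^ b) % 16777216 = (a % 16777216) ^^^ (b % 16777216) := by
  have := pvXorMod a b; norm_num at this; exact this

theorem pvMaskModL (a : Nat) : a &&& 16777215 = a % 16777216 := by
  have := Nat.and_two_pow_sub_one_eq_mod a 24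
  norm_num at this; exact this

theorem pvXorShiftL (x y s : Nat) : (x ^^^ y) <<< s = (x <<< s) ^^^ (y <<< s) := by
  apply Nat.eq_of_testBit_eq; intro i
  simp only [Nat.testBit_shiftLeft, Nat.testBit_xor]
  by_cases h : s ≤ i <;> simp [h]

theorem pvXorShiftR (x y s : Nat) : (x ^^^ y) >>> s = (x >>> s) ^^^ (y >>> s) := by
  apply Nat.eq_of_testBit_eq; intro i
  simp [Nat.testBit_shiftRight, Nat.testBit_xor]

theorem pvXorMix (a b c d : Nat) : (a ^^^ b) ^^^ (c ^^^ d) = (a ^^^ c) ^^^ (b ^^^ d) := by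
  apply Nat.eq_of_testBit_eq; intro i
  simp only [Nat.testBit_xor]
  cases a.testBit i <;> cases b.testBit i <;> cases c.testBit i <;> cases d.testBit i <;> rfl

theorem pvXorLC (a b c : Nat) : a ^^^ (b ^^^ c) = b ^^^ (a ^^^ c) := by
  apply Nat.eq_of_testBit_eq; intro i
  simp only [Nat.testBit_xor]
  cases a.testBit i <;> cases b.testBit i <;> cases c.testBit i <;> rfl

theorem pvXorDecompDiv (a b : Nat) : (a ^^^ b) / 2 = (a / 2) ^^^ (b / 2) := by
  rw [← Nat.shiftRight_one, ← Nat.shiftRight_one, ← Nat.shiftRight_one, pvXorShiftR]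

theorem pvXorDecompMod (a b : Nat) : (a ^^^ b) % 2 = (a % 2) ^^^ (b % 2) := by
  rw [← Nat.and_one_is_mod, ← Nat.and_one_is_mod, ← Nat.and_one_is_mod, Nat.and_xor_distrib_right]

theorem pvXorDecomp (a b : Nat) : a ^^^ b = 2 * ((a / 2) ^^^ (b / 2)) + ((a % 2) ^^^ (b % 2)) := by
  rw [← pvXorDecompDiv, ← pvXorDecompMod]
  omega

theorem pvMaskSub : ∀ (n : Nat) (x : Nat), x < 2^n → (2^n - 1) ^^^ x = 2^n - 1 - x := by
  intro n
  induction n with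
  | zero => intro x hx; interval_cases x; rfl
  | succ n ih =>
    intro x hx
    have h2 : 2^(n+1) = 2 * 2^n := by ring
    have hd : (2^(n+1) - 1) / 2 = 2^n - 1 := by omega
    have hm : (2^(n+1) - 1) % 2 = 1 := by omega
    have hx2 : x / 2 < 2^n := by omega
    have := ih (x / 2) hx2
    have hxb : x % 2 = 0 ∨ x % 2 = 1 := by omega
    rw [pvXorDecomp, hd, hm, this]
    rcases hxb with h | h <;> rw [h] <;> simp <;> omega

theorem pvMaskSubL (x : Nat) (hx : x < 16777216) : 16777215 ^^^ x = 16777215 - x := by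
  have := pvMaskSub 24 x (by norm_num; omega)
  norm_num at this; exact this

theorem pvShiftXorAdd : ∀ (k : Nat) (a lo : Nat), lo < 2^k → (a <<< k) ^^^ lo = (a <<< k) + lo := by
  intro k
  induction k with
  | zero => intro a lo hlo; interval_cases lo; simp
  | succ k ih =>
    intro a lo hlo
    have h2 : 2^(k+1) = 2 * 2^k := by ring
    have hsl : a <<< (k+1) = (a <<< k) * 2 := by
      rw [Nat.shiftLeft_eq, Nat.shiftLeft_eq, pow_succ]; ring
    have hd : (a <<< (k+1)) / 2 = a <<< k := by omega
    have hm : (a <<< (k+1)) % 2 = 0 := by omega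
    have hlo2 : lo / 2 < 2^k := by omega
    rw [pvXorDecomp, hd, hm, ih a (lo / 2) hlo2]
    simp only [Nat.zero_xor]
    omega

-- ---- B's round is GF(2)-linear and stays below 2^24 ----
theorem pvS1lin (x y : Nat) : altStage1 (x ^^^ y) = altStage1 x ^^^ altStage1 y := by
  unfold altStage1
  rw [← Nat.and_xor_distrib_right, pvXorShiftL, pvXorMix]

theorem pvS2lin (x y : Nat) : altStage2 (x ^^^ y) = altStage2 x ^^^ altStage2 y := by
  unfold altStage2
  rw [← Nat.and_xor_distrib_right, pvXorShiftR, pvXorMix]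

theorem pvS3lin (x y : Nat) : altStage3 (x ^^^ y) = altStage3 x ^^^ altStage3 y := by
  unfold altStage3
  rw [← Nat.and_xor_distrib_right, pvXorShiftL, pvXorMix]

theorem pvRoundLinear (x y : Nat) : altRound (x ^^^ y) = altRound x ^^^ altRound y := by
  unfold altRound
  rw [pvS1lin, pvS2lin, pvS3lin]

theorem pvRoundLt (x : Nat) : altRound x < 2^24 := by
  unfold altRound altStage3
  have := Nat.and_le_right (n := ((altStage2 (altStage1 x)) <<< 11) ^^^ altStage2 (altStage1 x)) (m := 16777215)
  omega

-- ---- altApply: pull-out, linearity, zero, compose ----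
theorem pvPull (x : Nat) (m : List Nat) : ∀ (l : List Nat) (a : Nat),
    l.foldl (fun out j => if (x >>> j) &&& 1 = 1 then out ^^^ m.getD j 0 else out) a
      = a ^^^ l.foldl (fun out j => if (x >>> j) &&& 1 = 1 then out ^^^ m.getD j 0 else out) 0 := by
  intro l
  induction l with
  | nil => intro a; simp
  | cons j t ih =>
    intro a
    simp only [List.foldl_cons]
    by_cases h : (x >>> j) &&& 1 = 1
    · simp only [if_pos h]
      rw [ih (a ^^^ m.getD j 0), ih (0 ^^^ m.getD j 0), Nat.zero_xor, Nat.xor_assoc]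
    · simp only [if_neg h]
      exact ih a

theorem pvApplyLinear (m : List Nat) (x y : Nat) :
    altApply m (x ^^^ y) = altApply m x ^^^ altApply m y := by
  unfold altApply
  have key : ∀ l : List Nat,
      l.foldl (fun out j => if ((x ^^^ y) >>> j) &&& 1 = 1 then out ^^^ m.getD j 0 else out) 0
        = (l.foldl (fun out j => if (x >>> j) &&& 1 = 1 then out ^^^ m.getD j 0 else out) 0)
          ^^^ (l.foldl (fun out j => if (y >>> j) &&& 1 = 1 then out ^^^ m.getD j 0 else out) 0) := by
    intro l
    induction l with
    | nil => simp
    | cons j t ih =>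
      have hbit : ((x ^^^ y) >>> j) &&& 1 = ((x >>> j) &&& 1) ^^^ ((y >>> j) &&& 1) := by
        rw [pvXorShiftR, Nat.and_xor_distrib_right]
      have hx01 : (x >>> j) &&& 1 = 0 ∨ (x >>> j) &&& 1 = 1 := by
        have := Nat.and_le_right (n := x >>> j) (m := 1); omega
      have hy01 : (y >>> j) &&& 1 = 0 ∨ (y >>> j) &&& 1 = 1 := by
        have := Nat.and_le_right (n := y >>> j) (m := 1); omega
      simp only [List.foldl_cons]
      rcases hx01 with hx | hx <;> rcases hy01 with hy | hy
      · simp only [if_neg (show ¬(((x ^^^ y) >>> j) &&& 1 = 1) from by rw [hbit, hx, hy]; decide),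
          if_neg (show ¬((x >>> j) &&& 1 = 1) from by rw [hx]; decide),
          if_neg (show ¬((y >>> j) &&& 1 = 1) from by rw [hy]; decide)]
        exact ih
      · simp only [if_pos (show ((x ^^^ y) >>> j) &&& 1 = 1 from by rw [hbit, hx, hy]; decide),
          if_neg (show ¬((x >>> j) &&& 1 = 1) from by rw [hx]; decide), if_pos hy]
        rw [pvPull (x ^^^ y) m t, pvPull y m t, ih, Nat.zero_xor, pvXorLC]
      · simp only [if_pos (show ((x ^^^ y) >>> j) &&& 1 = 1 from by rw [hbit, hx, hy]; decide),
          if_pos hx, if_neg (show ¬((y >>> j) &&& 1 = 1) from by rw [hy]; decide)]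
        rw [pvPull (x ^^^ y) m t, pvPull x m t, ih, Nat.zero_xor, ← Nat.xor_assoc]
      · simp only [if_neg (show ¬(((x ^^^ y) >>> j) &&& 1 = 1) from by rw [hbit, hx, hy]; decide),
          if_pos hx, if_pos hy]
        rw [pvPull x m t, pvPull y m t, ih, Nat.zero_xor,
          pvXorMix (m.getD j 0) _ (m.getD j 0) _, Nat.xor_self, Nat.zero_xor]
  exact key (List.range 24)

theorem pvApplyZero (m : List Nat) : altApply m 0 = 0 := by
  unfold altApply
  have h : ∀ l : List Nat,
      l.foldl (fun (out j : Nat) => if ((0:Nat) >>> j) &&& 1 = 1 then out ^^^ m.getD j 0 else out) 0 = 0 := by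
    intro l
    induction l with
    | nil => rfl
    | cons j t ih =>
      simp only [List.foldl_cons]
      rw [if_neg (show ¬(((0:Nat) >>> j) &&& 1 = 1) from by simp [Nat.zero_shiftRight])]
      exact ih
  exact h (List.range 24)

theorem pvComposeAux (a b : List Nat) (hb : b.length = 24) (x : Nat) :
    ∀ (l : List Nat), (∀ j ∈ l, j < 24) → ∀ acc : Nat,
      l.foldl (fun out j => if (x >>> j) &&& 1 = 1 then out ^^^ (altCompose a b).getD j 0 else out) (altApply a acc)
        = altApply a (l.foldl (fun out j => if (x >>> j) &&& 1 = 1 then out ^^^ b.getD j 0 else out) acc) := by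
  intro l
  induction l with
  | nil => intro _ acc; simp
  | cons j t ih =>
    intro hmem acc
    have hj : j < 24 := hmem j (List.mem_cons_self ..)
    have hjb : j < b.length := by omega
    have hc : (altCompose a b).getD j 0 = altApply a (b.getD j 0) := by
      unfold altCompose
      rw [List.getD_eq_getElem _ _ (by rw [List.length_map]; omega), List.getElem_map,
        List.getD_eq_getElem _ _ hjb]
    simp only [List.foldl_cons]
    by_cases hbit : (x >>> j) &&& 1 = 1
    · rw [if_pos hbit, if_pos hbit, hc, ← pvApplyLinear]
      exact ih (fun j' hj' => hmem j' (List.mem_cons_of_mem _ hj')) (acc ^^^ b.getD j 0)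
    · rw [if_neg hbit, if_neg hbit]
      exact ih (fun j' hj' => hmem j' (List.mem_cons_of_mem _ hj')) acc

theorem pvApplyCompose (a b : List Nat) (hb : b.length = 24) (x : Nat) :
    altApply (altCompose a b) x = altApply a (altApply b x) := by
  have haux := pvComposeAux a b hb x (List.range 24) (by intro j hj; exact List.mem_range.mp hj) 0
  rw [pvApplyZero] at haux
  exact haux

-- ---- altApply altMatrix agrees with altRound below 2^24 ----
theorem pvApplyBasis : ∀ j : Fin 24, altApply altMatrix (2^(j : Nat)) = altRound (2^(j : Nat)) := by
  decide

theorem pvAgree : ∀ (k : Nat), k ≤ 24 → ∀ x, x < 2^k → altApply altMatrix x = altRound x := by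
  intro k
  induction k with
  | zero =>
    intro _ x hx
    interval_cases x
    decide
  | succ k ih =>
    intro hk x hx
    have hp : 0 < 2^k := Nat.two_pow_pos k
    have hmod : x % 2^k < 2^k := Nat.mod_lt x hp
    have h2 : 2^(k+1) = 2 * 2^k := by ring
    have hdiv2 : x / 2^k < 2 := by
      apply (Nat.div_lt_iff_lt_mul hp).mpr
      omega
    have hb : x / 2^k = 0 ∨ x / 2^k = 1 := by
      generalize x / 2^k = d at hdiv2
      omega
    have hdm : 2^k * (x / 2^k) + x % 2^k = x := Nat.div_add_mod x (2^k)
    rcases hb with hb | hb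
    · have hx' : x < 2^k := by rw [hb, Nat.mul_zero, Nat.zero_add] at hdm; omega
      exact ih (by omega) x hx'
    · rw [hb, Nat.mul_one] at hdm
      have hxeq : x = 2^k + x % 2^k := by omega
      have hone : (1 : Nat) <<< k = 2^k := Nat.one_shiftLeft k
      have hxor : (2^k : Nat) ^^^ (x % 2^k) = x := by
        have h := pvShiftXorAdd k 1 (x % 2^k) hmod
        rw [hone] at h
        omega
      have hk24 : k < 24 := by omega
      have hbase := pvApplyBasis ⟨k, hk24⟩
      rw [← hxor, pvApplyLinear, pvRoundLinear, hbase, ih (by omega) (x % 2^k) hmod]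

-- ---- altPow computes iterates of any function the matrix represents ----
theorem pvPowEq : ∀ (k : Nat) (f : Nat → Nat) (m : List Nat) (x : Nat),
    m.length = 24 → (∀ y, y < 2^24 → altApply m y = f y) → (∀ y, y < 2^24 → f y < 2^24) →
    x < 2^24 → altPow m x k = f^[k] x := by
  intro k
  induction k using Nat.strong_induction_on with
  | _ k ihk =>
    intro f m x hlen hap hf hx
    by_cases hk : k = 0
    · subst hk; unfold altPow; simp
    · unfold altPow
      rw [dif_neg hk]
      have hclen : (altCompose m m).length = 24 := by
        unfold altCompose; rw [List.length_map]; exact hlen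
      have hcap : ∀ y, y < 2^24 → altApply (altCompose m m) y = f (f y) := by
        intro y hy
        rw [pvApplyCompose m m hlen, hap y hy, hap (f y) (hf y hy)]
      have hff : ∀ y, y < 2^24 → f (f y) < 2^24 := fun y hy => hf _ (hf y hy)
      have hx' : (if k % 2 = 1 then altApply m x else x) < 2^24 := by
        by_cases h : k % 2 = 1
        · rw [if_pos h, hap x hx]; exact hf x hx
        · rw [if_neg h]; exact hx
      have ih := ihk (k / 2) (Nat.div_lt_self (Nat.pos_of_ne_zero hk) (by norm_num))
        (f ∘ f) (altCompose m m) (if k % 2 = 1 then altApply m x else x) hclen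
        (by intro y hy; rw [hcap y hy]; rfl) (by intro y hy; exact hff y hy) hx'
      rw [ih]
      have hx'' : (if k % 2 = 1 then altApply m x else x) = f^[k % 2] x := by
        by_cases h : k % 2 = 1
        · rw [if_pos h, h, hap x hx]; rfl
        · rw [if_neg h, show k % 2 = 0 by omega]; rfl
      have h2 : (f ∘ f) = f^[2] := by
        funext z; simp [Function.iterate_succ, Function.comp]
      rw [hx'', h2, ← Function.iterate_mul, ← Function.iterate_add_apply]
      congr 1
      omega

-- ---- A's round equals B's round through the 24-bit window ----
theorem pvNegMod (r : Int) (hr : r < 0) :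
    PySem.Int.mod r 16777216 = ((16777215 ^^^ ((-r-1).toNat % 16777216) : Nat) : Int) := by
  rw [pvMaskSubL ((-r-1).toNat % 16777216) (by omega)]
  rw [PySem.Int.mod_eq_emod_of_pos (by norm_num)]
  omega

theorem pvStage1 (r : Int) :
    PySem.Int.mod (PySem.Int.bxor (r * 64) r) 16777216
      = ((altStage1 ((PySem.Int.mod r 16777216).toNat) : Nat) : Int) := by
  have hM : ((16777216 : Int)) = ((16777216 : Nat) : Int) := by norm_num
  by_cases hr : 0 ≤ r
  · have ha : ((r.toNat : Nat) : Int) = r := Int.toNat_of_nonneg hr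
    rw [← ha, show ((r.toNat : Int) * 64) = ((r.toNat * 64 : Nat) : Int) from by push_cast; ring,
      PySem.Int.bxor_natCast, hM, PySem.Int.mod_natCast, PySem.Int.mod_natCast]
    simp only [Int.toNat_natCast]
    unfold altStage1
    have e2 : ((r.toNat % 16777216) <<< 6) % 16777216 = (r.toNat * 64) % 16777216 := by
      rw [Nat.shiftLeft_eq]
      conv_rhs => rw [Nat.mul_mod, show (64 : Nat) % 16777216 = 64 from rfl]
    rw [pvMaskModL, pvXorModL, pvXorModL, e2, Nat.mod_mod_of_dvd _ (dvd_refl 16777216)]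
  · have hneg1 : ¬ (0 ≤ r * 64) := by omega
    have hneg2 : ¬ (0 ≤ r) := by omega
    have h64 : (-(r * 64) - 1).toNat = 64 * (-r-1).toNat + 63 := by omega
    have hbx : PySem.Int.bxor (r * 64) r = (((64 * (-r-1).toNat + 63) ^^^ (-r-1).toNat : Nat) : Int) := by
      simp only [PySem.Int.bxor, if_neg hneg1, if_neg hneg2]
      rw [h64]
    rw [hbx, pvNegMod r (by omega), hM, PySem.Int.mod_natCast]
    simp only [Int.toNat_natCast]
    -- pure Nat bit identity
    have key : ((64 * (-r-1).toNat + 63) ^^^ (-r-1).toNat) % 16777216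
        = altStage1 (16777215 ^^^ ((-r-1).toNat % 16777216)) := by
      set u := (-r-1).toNat with hudef
      have h63 : 64 * u + 63 = (u <<< 6) ^^^ 63 := by
        rw [pvShiftXorAdd 6 u 63 (by norm_num), Nat.shiftLeft_eq]
        omega
      unfold altStage1
      rw [h63, pvMaskModL]
      have eM : (16777216 : Nat) = 2^24 := by norm_num
      have em : (16777215 : Nat) = 2^24 - 1 := by norm_num
      have e63 : (63 : Nat) = 2^6 - 1 := by norm_num
      rw [eM, em, e63]
      apply Nat.eq_of_testBit_eq; intro i
      simp only [Nat.testBit_mod_two_pow, Nat.testBit_xor, Nat.testBit_shiftLeft,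
        Nat.testBit_two_pow_sub_one]
      by_cases h24 : i < 24
      · have h24' : i - 6 < 24 := by omega
        by_cases h6 : 6 ≤ i <;>
          simp [h24, h24', h6] <;>
          cases hx : u.testBit (i - 6) <;> cases hy : u.testBit i <;> simp <;> omega
      · simp [h24]
    rw [key]



theorem pvStage2 (k : Nat) :
    PySem.Int.mod (PySem.Int.bxor (PySem.Int.floordiv (k : Int) 32) (k : Int)) 16777216
      = ((altStage2 k : Nat) : Int) := by
  have h1 : PySem.Int.floordiv (k : Int) 32 = ((k / 32 : Nat) : Int) := by
    exact_mod_cast PySem.Int.floordiv_natCast k 32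
  rw [h1, PySem.Int.bxor_natCast,
    show ((16777216 : Int)) = ((16777216 : Nat) : Int) from by norm_num, PySem.Int.mod_natCast]
  unfold altStage2
  rw [pvMaskModL, Nat.shiftRight_eq_div_pow]

theorem pvStage3 (k : Nat) :
    PySem.Int.mod (PySem.Int.bxor ((k : Int) * 2048) (k : Int)) 16777216
      = ((altStage3 k : Nat) : Int) := by
  rw [show ((k : Int) * 2048) = ((k * 2048 : Nat) : Int) from by push_cast; ring,
    PySem.Int.bxor_natCast,
    show ((16777216 : Int)) = ((16777216 : Nat) : Int) from by norm_num, PySem.Int.mod_natCast]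
  unfold altStage3
  rw [pvMaskModL, Nat.shiftLeft_eq]

theorem pvStepEq (r : Int) :
    genStep r = ((altRound ((PySem.Int.mod r 16777216).toNat) : Nat) : Int) := by
  simp only [genStep, altRound]
  rw [pvStage1, pvStage2, pvStage3]

theorem pvModSelf (s : Nat) (hs : s < 2^24) : (PySem.Int.mod (s : Int) 16777216).toNat = s := by
  rw [show ((16777216 : Int)) = ((16777216 : Nat) : Int) from by norm_num, PySem.Int.mod_natCast]
  simp only [Int.toNat_natCast]
  omega

theorem pvLoopA (l : List Int) : ∀ s : Nat, s < 2^24 →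
    l.foldl (fun result _ => genStep result) ((s : Nat) : Int) = ((altRound^[l.length] s : Nat) : Int) := by
  induction l with
  | nil => intro s _; simp
  | cons e t ih =>
    intro s hs
    simp only [List.foldl_cons, List.length_cons]
    rw [pvStepEq, pvModSelf s hs, ih (altRound s) (pvRoundLt s), ← Function.iterate_succ_apply]

theorem pvRangeNil (n : Int) (h : n ≤ 0) : PySem.List.pyRange 0 n = [] := by
  simp [PySem.List.pyRange, show ¬ ((0:Int) < n) from by omega]

-- ===== VERDICT (by name: the statement is the Claim_ definition above) =====
theorem gen_num_spec : Claim_equal_gen_num := by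
  intro num n _
  unfold Spec_gen_num gen_num gen_num_alt
  by_cases hn : n ≤ 0
  · rw [if_pos hn, pvRangeNil n hn]
    rfl
  · rw [if_neg hn]
    have hn0 : (0:Int) ≤ n := by omega
    obtain ⟨m, hm1⟩ : ∃ m, n.toNat = m + 1 := ⟨n.toNat - 1, by omega⟩
    have hs0lt : (PySem.Int.mod num 16777216).toNat < 2^24 := by
      have h1 := PySem.Int.mod_lt num (b := 16777216) (by norm_num)
      have h2 := PySem.Int.mod_nonneg num (b := 16777216) (by norm_num)
      omega
    have hrange := PySem.List.pyRange_zero_natCast n.toNat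
    rw [show ((n.toNat : Nat) : Int) = n from by omega] at hrange
    have hcons := PySem.List.pyRange_one_cons (show (0:Int) < n from by omega)
    have hlenfull : (PySem.List.pyRange 0 n).length = n.toNat := by
      rw [hrange]; simp
    rw [hcons] at hlenfull
    simp only [List.length_cons] at hlenfull
    have hlen1 : (PySem.List.pyRange (0+1) n).length = m := by omega
    rw [hcons]
    simp only [List.foldl_cons]
    rw [pvStepEq num, pvLoopA _ _ (pvRoundLt _), hlen1, ← Function.iterate_succ_apply, hm1,
      pvPowEq (m+1) altRound altMatrix _ (by unfold altMatrix; simp)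
        (fun y hy => pvAgree 24 (le_refl 24) y hy) (fun y _ => pvRoundLt y) hs0lt]
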